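-- pv_equiv track=rewrite | github.com/achaykovsky/python_exercises | decode-xored-array/trivial_solution.py | solution
-- ===== SOURCE A (Python) =====
-- from typing import List
--
-- def solution(encoded: List[int], first: int):
--     result = [first]
--     index = 0
--     for encoded_element in encoded:
--         decoded = encoded_element ^ result[index]
--         result.append(decoded)
--         index += 1
--     return result
-- ===== SOURCE B (Python) =====
-- from typing import List
--
-- def solution(encoded: List[int], first: int):
--     # back-to-front: fold the total XOR, then peel encoded off from the end,
--     # emitting the decoded array in reverse and flipping it once at the close
--     acc = first
--     for e in encoded:
--         acc ^= e
--     out = [acc]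
--     for e in reversed(encoded):
--         acc ^= e
--         out.append(acc)
--     out.reverse()
--     return out
-- ===== Notes on version B (the rewrite author's own statement) =====
-- stated objective: alternative
-- what changed: Instead of decoding forward by indexing into the growing result, B first folds the total XOR of first with all encoded elements, then reconstructs the answer back-to-front by cancelling encoded elements off the accumulator over the reversed list, reversing the collected output once at the end; correct because XOR is an involution.
import Mathlib
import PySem

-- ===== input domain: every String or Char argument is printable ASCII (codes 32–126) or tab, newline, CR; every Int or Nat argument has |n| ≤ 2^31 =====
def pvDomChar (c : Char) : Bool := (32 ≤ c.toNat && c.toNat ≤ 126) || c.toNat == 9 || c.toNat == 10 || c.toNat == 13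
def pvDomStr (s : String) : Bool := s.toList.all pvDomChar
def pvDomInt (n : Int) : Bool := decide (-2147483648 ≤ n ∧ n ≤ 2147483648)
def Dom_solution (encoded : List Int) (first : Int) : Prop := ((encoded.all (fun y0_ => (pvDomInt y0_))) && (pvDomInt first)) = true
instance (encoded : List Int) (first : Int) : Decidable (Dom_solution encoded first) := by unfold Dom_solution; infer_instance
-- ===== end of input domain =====

-- B decodes back-to-front: it folds the total XOR, then cancels encoded elements off the accumulator over the reversed list and reverses the collected output (alternative traversal; same behaviour).


-- ===== PORT A =====
-- result[index] is always in range in A (index = len(result) - 1), so pyGetD with default 0 is exact here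
def solution (encoded : List Int) (first : Int) : List Int :=
  (encoded.foldl
    (fun (st : List Int × Int) encoded_element =>
      let decoded := PySem.Int.bxor encoded_element (PySem.List.pyGetD st.1 st.2 0)
      (st.1 ++ [decoded], st.2 + 1))
    ([first], 0)).1

-- ===== PORT B =====
def solution_alt (encoded : List Int) (first : Int) : List Int :=
  let acc := encoded.foldl (fun a e => PySem.Int.bxor a e) first
  let st := encoded.reverse.foldl
    (fun (p : List Int × Int) e =>
      let a' := PySem.Int.bxor p.2 e
      (p.1 ++ [a'], a'))
    ([acc], acc)
  st.1.reverse

-- ===== PRECONDITION & SPEC =====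
def Spec_solution (encoded : List Int) (first : Int) (out : List Int) : Prop := out = solution_alt encoded first
instance (encoded : List Int) (first : Int) (out : List Int) : Decidable (Spec_solution encoded first out) := by unfold Spec_solution; infer_instance

-- ===== CLAIM =====
def Claim_equal_solution : Prop := ∀ (encoded : List Int) (first : Int), Dom_solution encoded first → Spec_solution encoded first (solution encoded first)

-- ===== LEMMAS AND PROOFS =====

-- the forward running-XOR scan both programs' results are characterised by
def scanXor (acc : Int) (rest : List Int) : List Int :=
  match rest with
  | [] => []
  | e :: rest' =>
    let acc' := PySem.Int.bxor acc e
    acc' :: scanXor acc' rest'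

theorem bxor_cancel (a b : Int) : PySem.Int.bxor (PySem.Int.bxor a b) b = a := by
  unfold PySem.Int.bxor
  by_cases ha : 0 ≤ a <;> by_cases hb : 0 ≤ b
  · rw [if_pos ha, if_pos hb, if_pos (Int.natCast_nonneg _), if_pos hb]
    rw [Int.toNat_natCast, Nat.xor_xor_cancel_right]
    omega
  · rw [if_pos ha, if_neg hb, if_neg (by omega : ¬ (0:Int) ≤ -↑(a.toNat ^^^ (-b - 1).toNat) - 1), if_neg hb]
    have : (-(-↑(a.toNat ^^^ (-b - 1).toNat) - 1) - 1 : Int) = ↑(a.toNat ^^^ (-b - 1).toNat) := by ring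
    rw [this, Int.toNat_natCast, Nat.xor_xor_cancel_right]
    omega
  · rw [if_neg ha, if_pos hb, if_neg (by omega : ¬ (0:Int) ≤ -↑((-a - 1).toNat ^^^ b.toNat) - 1), if_pos hb]
    have : (-(-↑((-a - 1).toNat ^^^ b.toNat) - 1) - 1 : Int) = ↑((-a - 1).toNat ^^^ b.toNat) := by ring
    rw [this, Int.toNat_natCast, Nat.xor_xor_cancel_right]
    omega
  · rw [if_neg ha, if_neg hb, if_pos (Int.natCast_nonneg _), if_neg hb]
    rw [Int.toNat_natCast, Nat.xor_xor_cancel_right]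
    omega

-- A's loop invariant: with result = res ++ [x] and index = len res, the rest of the loop appends the scan of x
theorem solution_loop (encoded : List Int) :
    ∀ (res : List Int) (x : Int),
    (encoded.foldl
      (fun (st : List Int × Int) encoded_element =>
        let decoded := PySem.Int.bxor encoded_element (PySem.List.pyGetD st.1 st.2 0)
        (st.1 ++ [decoded], st.2 + 1))
      (res ++ [x], (res.length : Int))).1 = (res ++ [x]) ++ scanXor x encoded := by
  induction encoded with
  | nil => intro res x; simp [scanXor]
  | cons e rest ih =>
    intro res x
    have hget : PySem.List.pyGetD (res ++ [x]) (res.length : Int) 0 = x := by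
      simp [PySem.List.pyGetD_natCast, List.getD]
    simp only [List.foldl_cons, hget]
    have h2 : ((res.length : Int) + 1) = (((res ++ [x]).length : Nat) : Int) := by simp
    have := ih (res ++ [x]) (PySem.Int.bxor e x)
    rw [h2, this]
    simp [scanXor, PySem.Int.bxor_comm]

theorem scanXor_snoc (l : List Int) : ∀ (a e : Int),
    scanXor a (l ++ [e]) = scanXor a l ++ [(l ++ [e]).foldl (fun x y => PySem.Int.bxor x y) a] := by
  induction l with
  | nil => intro a e; simp [scanXor]
  | cons h t ih => intro a e; simp [scanXor, ih]

-- B's backward loop builds the reverse of [first] ++ scanXor first l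
theorem solution_alt_loop (l : List Int) : ∀ (first : Int) (pre : List Int),
    (l.reverse.foldl
      (fun (p : List Int × Int) e =>
        let a' := PySem.Int.bxor p.2 e
        (p.1 ++ [a'], a'))
      (pre ++ [l.foldl (fun a e => PySem.Int.bxor a e) first],
       l.foldl (fun a e => PySem.Int.bxor a e) first)).1
    = pre ++ (first :: scanXor first l).reverse := by
  induction l using List.reverseRecOn with
  | nil => intro first pre; simp [scanXor]
  | append_singleton t e ih =>
    intro first pre
    have hX : (t ++ [e]).foldl (fun a e => PySem.Int.bxor a e) first
        = PySem.Int.bxor (t.foldl (fun a e => PySem.Int.bxor a e) first) e := by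
      simp
    simp only [List.reverse_append, List.reverse_singleton, List.singleton_append,
      List.foldl_cons, hX, bxor_cancel]
    have := ih first (pre ++ [PySem.Int.bxor (t.foldl (fun a e => PySem.Int.bxor a e) first) e])
    rw [List.append_assoc] at this ⊢
    rw [this]
    rw [scanXor_snoc, hX]
    simp

-- ===== VERDICT =====
theorem solution_spec : Claim_equal_solution := by
  intro encoded first _
  unfold Spec_solution solution solution_alt
  have hA := solution_loop encoded [] first
  have hB := solution_alt_loop encoded first []
  simp only [List.nil_append, List.length_nil, Nat.cast_zero] at hA hB
  rw [hA]
  simp only [List.foldl_reverse] at hB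
  simp [hB]
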